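-- pv_equiv track=rewrite | github.com/lioneltabourier/ppi3d_project | Codes_ppi3d/evaluation.py | tp_fp
-- ===== SOURCE A (Python) =====
-- def tp_fp(score_lst, test_ael, num_pred_max, step):
--     """ generate a triplet of lists with the number of predictions, number of TP predictions , number of FP predictions every step until num_pred_max """
--     lst_tp = []
--     lst_fp = []
--     lst_pred = []
--     num_pred = 0
--     num_tp = 0
--     num_fp = 0
--     for pred in score_lst[:num_pred_max+1] :
--         (i,j), score = pred
--         if i in test_ael and j in test_ael[i]:
--             num_tp += 1
--         else:
--             num_fp += 1
--         num_pred +=1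
--         if (num_pred-1) % step == 0:
--             lst_tp.append(num_tp)
--             lst_fp.append(num_fp)
--             lst_pred.append(num_pred)
--     return lst_pred, lst_tp, lst_fp
-- ===== SOURCE B (Python) =====
-- from itertools import accumulate
--
-- def tp_fp(score_lst, test_ael, num_pred_max, step):
--     """Two-pass version: cumulative TP prefix sums first, then strided sampling."""
--     sl = score_lst[:num_pred_max+1]
--     cum = [0] + list(accumulate(
--         1 if i in test_ael and j in test_ael[i] else 0 for (i, j), score in sl))
--     lst_pred, lst_tp, lst_fp = [], [], []
--     for t in range(0, len(sl), step):
--         lst_pred.append(t + 1)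
--         lst_tp.append(cum[t + 1])
--         lst_fp.append(t + 1 - cum[t + 1])
--     return lst_pred, lst_tp, lst_fp
-- ===== Notes on version B (the rewrite author's own statement) =====
-- stated objective: alternative
-- what changed: Replaces A's single interleaved loop (six mutable counters, conditional sampling inside) by two differently-shaped passes: a cumulative-TP prefix-sum list built with itertools.accumulate over a 0/1 indicator sequence, then a strided range(0, len, step) loop that reads the prefix list and derives FP as count minus TP; …
-- outside the precondition, e.g. on tp_fp([], {}, 0, 0): A returns ([], [], []), B raises ValueError; on tp_fp([((1, 2), 5)], {}, 3, -1): A returns ([1], [0], [1]), B returns ([], [], [])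
import Mathlib
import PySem

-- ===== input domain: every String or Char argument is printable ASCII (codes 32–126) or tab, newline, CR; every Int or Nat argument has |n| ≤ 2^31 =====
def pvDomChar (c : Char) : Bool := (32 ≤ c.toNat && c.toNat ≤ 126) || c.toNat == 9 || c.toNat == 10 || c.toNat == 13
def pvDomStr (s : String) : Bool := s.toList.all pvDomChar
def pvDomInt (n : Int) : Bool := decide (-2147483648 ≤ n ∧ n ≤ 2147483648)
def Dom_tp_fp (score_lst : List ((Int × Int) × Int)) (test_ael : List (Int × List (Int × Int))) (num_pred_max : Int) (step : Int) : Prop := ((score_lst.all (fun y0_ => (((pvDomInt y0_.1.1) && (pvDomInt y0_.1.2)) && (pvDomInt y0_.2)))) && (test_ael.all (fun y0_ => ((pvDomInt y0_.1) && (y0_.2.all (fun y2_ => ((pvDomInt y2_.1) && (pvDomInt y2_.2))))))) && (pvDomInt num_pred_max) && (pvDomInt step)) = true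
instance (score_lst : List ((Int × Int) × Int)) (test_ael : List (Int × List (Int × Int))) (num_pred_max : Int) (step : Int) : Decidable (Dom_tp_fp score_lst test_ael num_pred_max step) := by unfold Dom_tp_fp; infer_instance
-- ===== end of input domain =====

-- B replaces A's interleaved loop by a prefix-sum pass followed by a strided sampling pass
-- (alternative decomposition, same cost); proved equal for positive step.

-- ===== PORT A =====
-- shared helper: the Python test `i in test_ael and j in test_ael[i]` (both sources contain
-- this exact expression); inner dict membership is key membership of the association list
def tpHit (test_ael : List (Int × List (Int × Int))) (i j : Int) : Bool :=
  (PySem.Dict.mk test_ael).contains i &&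
    (PySem.Dict.mk ((PySem.Dict.mk test_ael).getD i [])).contains j

-- loop body of A: state = (lst_tp, lst_fp, lst_pred, num_pred, num_tp, num_fp)
def aBody (test_ael : List (Int × List (Int × Int))) (step : Int)
    (s : List Int × List Int × List Int × Int × Int × Int)
    (pred : (Int × Int) × Int) : List Int × List Int × List Int × Int × Int × Int :=
  let (lst_tp, lst_fp, lst_pred, num_pred, num_tp, num_fp) := s
  let i := pred.1.1
  let j := pred.1.2
  let (num_tp, num_fp) :=
    if tpHit test_ael i j then (num_tp + 1, num_fp) else (num_tp, num_fp + 1)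
  let num_pred := num_pred + 1
  if PySem.Int.mod (num_pred - 1) step = 0 then
    (lst_tp ++ [num_tp], lst_fp ++ [num_fp], lst_pred ++ [num_pred], num_pred, num_tp, num_fp)
  else
    (lst_tp, lst_fp, lst_pred, num_pred, num_tp, num_fp)

def tp_fp (score_lst : List ((Int × Int) × Int)) (test_ael : List (Int × List (Int × Int))) (num_pred_max : Int) (step : Int) : List Int × List Int × List Int :=
  let sl := PySem.List.slice score_lst none (some (num_pred_max + 1))
  let st := sl.foldl (aBody test_ael step) ([], [], [], 0, 0, 0)
  (st.2.2.1, st.1, st.2.1)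

-- ===== PORT B =====
-- B's indicator: 1 if the prediction is a true positive, else 0
def bInd (test_ael : List (Int × List (Int × Int))) (pred : (Int × Int) × Int) : Int :=
  if tpHit test_ael pred.1.1 pred.1.2 then 1 else 0

-- itertools.accumulate with a leading 0: state = (list so far, running sum)
def bAccum (acc : List Int × Int) (x : Int) : List Int × Int :=
  (acc.1 ++ [acc.2 + x], acc.2 + x)

-- second pass of B: sample the prefix list at a strided position t
def bSamp (cum : List Int) (acc : List Int × List Int × List Int) (t : Int) :
    List Int × List Int × List Int :=
  let tp := PySem.List.pyGetD cum (t + 1) 0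
  (acc.1 ++ [t + 1], acc.2.1 ++ [tp], acc.2.2 ++ [t + 1 - tp])

def tp_fp_alt (score_lst : List ((Int × Int) × Int)) (test_ael : List (Int × List (Int × Int))) (num_pred_max : Int) (step : Int) : List Int × List Int × List Int :=
  let sl := PySem.List.slice score_lst none (some (num_pred_max + 1))
  let cum := ((sl.map (bInd test_ael)).foldl bAccum ([0], 0)).1
  (PySem.List.pyRange 0 (sl.length : Int) step).foldl (bSamp cum) ([], [], [])

-- ===== PRECONDITION & SPEC =====
-- Pre_ restricts to positive step, the natural domain of a sampling stride: for step = 0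
-- A raises ZeroDivisionError (except on an empty slice, where A returns three empty lists
-- while B's range(0, 0, 0) raises ValueError), and for negative step — outside the
-- function's purpose — A samples every |step|-th position while B yields no samples;
-- both are defensible readings of a negative stride.
def Pre_tp_fp (score_lst : List ((Int × Int) × Int)) (test_ael : List (Int × List (Int × Int))) (num_pred_max : Int) (step : Int) : Prop := 1 ≤ step
instance (score_lst : List ((Int × Int) × Int)) (test_ael : List (Int × List (Int × Int))) (num_pred_max : Int) (step : Int) : Decidable (Pre_tp_fp score_lst test_ael num_pred_max step) := by unfold Pre_tp_fp; infer_instance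

def pvWitness_tp_fp : (List ((Int × Int) × Int)) × (List (Int × List (Int × Int))) × Int × Int :=
  ([((1, 2), 5), ((1, 3), 4)], [(1, [(2, 7)])], 3, 1)

def Spec_tp_fp (score_lst : List ((Int × Int) × Int)) (test_ael : List (Int × List (Int × Int))) (num_pred_max : Int) (step : Int) (out : List Int × List Int × List Int) : Prop := out = tp_fp_alt score_lst test_ael num_pred_max step
instance (score_lst : List ((Int × Int) × Int)) (test_ael : List (Int × List (Int × Int))) (num_pred_max : Int) (step : Int) (out : List Int × List Int × List Int) : Decidable (Spec_tp_fp score_lst test_ael num_pred_max step out) := by unfold Spec_tp_fp; infer_instance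

-- ===== CLAIM =====
def Claim_equal_tp_fp : Prop := ∀ (score_lst : List ((Int × Int) × Int)) (test_ael : List (Int × List (Int × Int))) (num_pred_max : Int) (step : Int), Dom_tp_fp score_lst test_ael num_pred_max step → Pre_tp_fp score_lst test_ael num_pred_max step → Spec_tp_fp score_lst test_ael num_pred_max step (tp_fp score_lst test_ael num_pred_max step)

-- ===== LEMMAS AND PROOFS =====

-- A-side style single-step accumulator, used only inside the proof to bridge the two folds
def bCum (test_ael : List (Int × List (Int × Int)))
    (acc : List Int × Int) (pred : (Int × Int) × Int) : List Int × Int :=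
  let c := if tpHit test_ael pred.1.1 pred.1.2 then acc.2 + 1 else acc.2
  (acc.1 ++ [c], c)

-- B's map-then-accumulate pass equals the fused single fold bCum
lemma accum_eq_bCum (test_ael : List (Int × List (Int × Int)))
    (l : List ((Int × Int) × Int)) (init : List Int × Int) :
    (l.map (bInd test_ael)).foldl bAccum init = l.foldl (bCum test_ael) init := by
  rw [List.foldl_map]
  apply PySem.List.foldl_congr_mem
  intro acc p _
  unfold bAccum bCum bInd
  by_cases h : tpHit test_ael p.1.1 p.1.2 <;> simp [h]

-- length of the cumulative list built by the fused fold
lemma bCum_len (test_ael : List (Int × List (Int × Int))) :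
    ∀ (l : List ((Int × Int) × Int)) (acc : List Int) (c : Int),
      ((l.foldl (bCum test_ael) (acc, c)).1).length = acc.length + l.length := by
  intro l
  induction l with
  | nil => intro acc c; simp
  | cons x l ih =>
    intro acc c
    simp only [List.foldl_cons, bCum]
    rw [ih]
    simp only [List.length_append, List.length_cons, List.length_nil]
    omega

-- range(0, n+1, k) extends range(0, n, k) by [n] exactly when k divides n
lemma pyRange_succ_right (k n : Nat) (hk : 0 < k) :
    PySem.List.pyRange 0 ((n : Int) + 1) (k : Int) =
      PySem.List.pyRange 0 (n : Int) (k : Int) ++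
        (if (k : Int) ∣ (n : Int) then [(n : Int)] else []) := by
  have hk' : (0 : Int) < (k : Int) := by exact_mod_cast hk
  rw [PySem.List.pyRange_of_pos _ _ hk', PySem.List.pyRange_of_pos _ _ hk']
  have hA : (if (0 : Int) < (n : Int) + 1 then ((((n : Int) + 1) - 0 + k - 1) / k).toNat else 0)
      = (n + k) / k := by
    rw [if_pos (by positivity)]
    have h : ((n : Int) + 1 - 0 + k - 1) = ((n + k : Nat) : Int) := by push_cast; ring
    rw [h, ← Int.natCast_ediv, Int.toNat_natCast]
  rw [hA]
  by_cases hd : (k : Int) ∣ (n : Int)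
  · rw [if_pos hd]
    have hdn : k ∣ n := by exact_mod_cast hd
    obtain ⟨q, rfl⟩ := hdn
    have hA2 : (k * q + k) / k = q + 1 := by
      rw [Nat.add_div_right _ hk, Nat.mul_div_cancel_left _ hk]
    rw [hA2, List.range_succ, List.map_append]
    congr 1
    · by_cases hq : 0 < k * q
      · have hqpos : (0 : Int) < ((k * q : Nat) : Int) := by exact_mod_cast hq
        rw [if_pos hqpos]
        congr 1
        have h1 : ((k * q : Nat) : Int) - 0 + k - 1 = (((k * q + k - 1 : Nat)) : Int) := by
          push_cast [Nat.cast_sub (by omega : 1 ≤ k * q + k)]; ring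
        rw [h1, ← Int.natCast_ediv]
        have h2 : (k * q + k - 1) / k = q := by
          have h3 : k * q + k - 1 = (k - 1) + k * q := by
            have : 1 ≤ k * q := hq
            omega
          rw [h3, Nat.add_mul_div_left _ _ hk, Nat.div_eq_of_lt (by omega)]
          omega
        rw [h2, Int.toNat_natCast]
      · have hq0 : q = 0 := by
          rcases Nat.eq_zero_or_pos q with h | h
          · exact h
          · exact absurd (Nat.mul_pos hk h) hq
        subst hq0
        simp
    · simp
  · rw [if_neg hd]
    have hn0 : n ≠ 0 := by
      rintro rfl; exact hd (by simp)
    have hdn : ¬ k ∣ n := fun h => hd (by exact_mod_cast h)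
    have hpos : (0 : Int) < (n : Int) := by positivity
    rw [if_pos hpos, List.append_nil]
    congr 1
    have h1 : ((n : Int) - 0 + k - 1) = ((n + k - 1 : Nat) : Int) := by
      push_cast [Nat.cast_sub (by omega : 1 ≤ n + k)]; ring
    rw [h1, ← Int.natCast_ediv]
    have e1 : (n + k) / k = n / k + 1 := Nat.add_div_right _ hk
    have e2 : (n + k - 1) / k = (n - 1) / k + 1 := by
      have h : n + k - 1 = (n - 1) + k := by omega
      rw [h, Nat.add_div_right _ hk]
    have e3 : n / k = (n - 1) / k := by
      have hsd := @Nat.succ_div (n - 1) k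
      have hn : n - 1 + 1 = n := by omega
      rw [hn] at hsd
      rw [hsd, if_neg hdn]
      simp
    rw [Int.toNat_natCast, e2, e1, e3]

-- B's sampling pass ignores the appended last element of the cumulative list
lemma bSamp_congr (cum : List Int) (c' : Int) (n : Nat) (hlen : cum.length = n + 1)
    (k : Int) (hk : 0 < k) (acc : List Int × List Int × List Int) :
    (PySem.List.pyRange 0 (n : Int) k).foldl (bSamp (cum ++ [c'])) acc =
      (PySem.List.pyRange 0 (n : Int) k).foldl (bSamp cum) acc := by
  apply PySem.List.foldl_congr_mem
  intro acc t ht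
  obtain ⟨h0, h1, -⟩ := (PySem.List.mem_pyRange_iff_of_pos hk t).mp ht
  unfold bSamp
  have hb0 : 0 ≤ t + 1 := by omega
  have hb1' : t + 1 < (cum.length : Int) := by
    rw [hlen]; push_cast; omega
  have hb1 : t + 1 < (((cum ++ [c']).length : Int)) := by
    simp only [List.length_append, List.length_cons, List.length_nil]; push_cast; omega
  rw [PySem.List.pyGetD_eq_getElem _ _ hb0 hb1, PySem.List.pyGetD_eq_getElem _ _ hb0 hb1',
    List.getElem_append_left (by omega)]

lemma pyGetD_last (cum : List Int) (c' : Int) :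
    PySem.List.pyGetD (cum ++ [c']) ((cum.length : Int)) 0 = c' := by
  rw [PySem.List.pyGetD_eq_getElem _ _ (by positivity) (by
    simp only [List.length_append, List.length_cons, List.length_nil]; push_cast; omega)]
  simp

-- the heart of the proof: A's interleaved fold equals B's two passes, for every list
lemma main_fold (test_ael : List (Int × List (Int × Int))) (step : Int) (hs : 1 ≤ step) :
    ∀ (l : List ((Int × Int) × Int)),
      l.foldl (aBody test_ael step) ([], [], [], 0, 0, 0) =
        (let cum := (l.foldl (bCum test_ael) (([0] : List Int), 0)).1
         let r := (PySem.List.pyRange 0 (l.length : Int) (step.natAbs : Int)).foldl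
                    (bSamp cum) ([], [], [])
         (r.2.1, r.2.2, r.1, (l.length : Int),
           (l.foldl (bCum test_ael) (([0] : List Int), 0)).2,
           (l.length : Int) - (l.foldl (bCum test_ael) (([0] : List Int), 0)).2)) := by
  intro l
  induction l using List.reverseRecOn with
  | nil => simp [PySem.List.pyRange]
  | append_singleton l x ih =>
    have hk : 0 < step.natAbs := Int.natAbs_pos.mpr (by omega)
    have hk' : (0 : Int) < (step.natAbs : Int) := by exact_mod_cast hk
    rw [List.foldl_append, List.foldl_append, ih]
    simp only [List.foldl_cons, List.foldl_nil]
    set cum := (l.foldl (bCum test_ael) (([0] : List Int), 0)).1 with hcum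
    set c := (l.foldl (bCum test_ael) (([0] : List Int), 0)).2 with hc
    have hlen : cum.length = l.length + 1 := by
      rw [hcum, bCum_len]
      simp only [List.length_cons, List.length_nil]
      omega
    set n := l.length with hn
    set c' : Int := if tpHit test_ael x.1.1 x.1.2 then c + 1 else c with hc'
    have hfold : l.foldl (bCum test_ael) (([0] : List Int), 0) = (cum, c) := by
      rw [hcum, hc]
    have hbx : bCum test_ael (cum, c) x = (cum ++ [c'], c') := by
      simp only [bCum, hc']
    rw [hfold, hbx]
    have hlen2 : ((l ++ [x]).length : Int) = (n : Int) + 1 := by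
      simp [hn]
    rw [hlen2, pyRange_succ_right _ _ hk, List.foldl_append,
      bSamp_congr cum c' n hlen _ hk']
    set r := (PySem.List.pyRange 0 (n : Int) (step.natAbs : Int)).foldl (bSamp cum)
      ([], [], []) with hr
    have hmod : (PySem.Int.mod ((n : Int) + 1 - 1) step = 0) ↔
        ((step.natAbs : Int) ∣ (n : Int)) := by
      have h : (n : Int) + 1 - 1 = (n : Int) := by ring
      rw [h, PySem.Int.mod_eq_zero_iff_dvd, Int.natAbs_dvd]
    by_cases hdvd : (step.natAbs : Int) ∣ (n : Int)
    · rw [if_pos hdvd]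
      simp only [List.foldl_cons, List.foldl_nil]
      have hsamp : bSamp (cum ++ [c']) r (n : Int) =
          (r.1 ++ [(n : Int) + 1], r.2.1 ++ [c'], r.2.2 ++ [(n : Int) + 1 - c']) := by
        unfold bSamp
        have h : (n : Int) + 1 = ((cum.length : Int)) := by
          rw [hlen]; push_cast; omega
        rw [h, pyGetD_last]
      rw [hsamp]
      simp only [aBody, hc']
      rw [if_pos (hmod.mpr hdvd)]
      by_cases hhit : tpHit test_ael x.1.1 x.1.2
      · simp only [hhit, if_true]
        have h : (n : Int) + 1 - (c + 1) = (n : Int) - c := by ring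
        rw [h]
      · simp only [hhit, if_false, Bool.false_eq_true]
        have h : (n : Int) + 1 - c = (n : Int) - c + 1 := by ring
        rw [h]
    · rw [if_neg hdvd, List.foldl_nil]
      simp only [aBody, hc']
      rw [if_neg (fun h => hdvd (hmod.mp h))]
      by_cases hhit : tpHit test_ael x.1.1 x.1.2
      · simp only [hhit, if_true]
        rw [show (n : Int) + 1 - (c + 1) = (n : Int) - c by ring]
      · simp only [hhit, if_false, Bool.false_eq_true]
        rw [show (n : Int) + 1 - c = (n : Int) - c + 1 by ring]

-- ===== VERDICT =====
theorem tp_fp_spec : Claim_equal_tp_fp := by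
  intro score_lst test_ael num_pred_max step _hdom hpre
  unfold Spec_tp_fp tp_fp tp_fp_alt
  have hstep : ((step.natAbs : Nat) : Int) = step := Int.natAbs_of_nonneg (by exact le_trans (by norm_num) hpre)
  have hm := main_fold test_ael step hpre
  rw [hstep] at hm
  simp only [accum_eq_bCum, hm]
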